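-- pv_equiv track=rewrite | github.com/wyk18703232953/myResearch | codeComplex/data/filteredData/python/linear/python_linear_0003.py | decimal_to_26
-- ===== SOURCE A (Python) =====
-- def decimal_to_26(num):
--     num = int(num)
--     res = ''
--     while num:
--         mod = num % 26
--         if mod == 0:
--             res = 'Z' + res
--             num = num // 26 - 1
--
--         else:
--             num //= 26
--             res = chr(mod + 64) + res
--     return res
-- ===== SOURCE B (Python) =====
-- def decimal_to_26(num):
--     num = int(num)
--     # Stage 1: find the length L of the result: smallest L with
--     # num <= 26 + 26**2 + ... + 26**L; keep total = that sum and p = 26**L.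
--     L = 0
--     total = 0
--     p = 1
--     while num > total:
--         p *= 26
--         total += p
--         L += 1
--     # Stage 2: num is the (m+1)-th string of length L (0-based index m);
--     # write m in plain base 26, most significant digit first.
--     m = num - (total - p) - 1
--     res = []
--     for _ in range(L):
--         p //= 26
--         res.append(chr(m // p + 65))
--         m %= p
--     return ''.join(res)
-- ===== Notes on version B (the rewrite author's own statement) =====
-- stated objective: alternative
-- what changed: Instead of A's single LSB-first digit-extraction loop that prepends characters, B runs two stages: it first finds the result length L (smallest L with num <= 26+26^2+...+26^L), then converts the 0-based offset m = num - base - 1 into L plain base-26 digits emitted most-significant-first, appending to a list joined at the end.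
import Mathlib
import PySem

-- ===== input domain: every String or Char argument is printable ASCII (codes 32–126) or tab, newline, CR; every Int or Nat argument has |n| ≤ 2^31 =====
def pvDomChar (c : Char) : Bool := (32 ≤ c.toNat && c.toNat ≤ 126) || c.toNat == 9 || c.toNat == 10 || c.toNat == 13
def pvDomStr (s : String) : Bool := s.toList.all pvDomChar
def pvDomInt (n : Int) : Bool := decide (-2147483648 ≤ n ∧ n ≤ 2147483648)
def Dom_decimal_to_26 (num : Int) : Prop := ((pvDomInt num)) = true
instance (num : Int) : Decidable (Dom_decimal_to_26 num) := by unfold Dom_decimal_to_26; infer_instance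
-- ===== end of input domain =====

-- B replaces A's LSB-first extract-and-prepend loop by two stages: find the result
-- length L, then emit the L plain base-26 digits of the 0-based block offset
-- most-significant-first; objective: alternative (same cost, different algorithm).

-- ===== PORT A =====
-- A's loop: while num: mod = num % 26; if mod == 0: res = 'Z'+res; num = num//26 - 1
--           else: num //= 26; res = chr(mod+64) + res
-- (structural recursion on a fuel counter that only makes the loop total: num.toNat
-- bounds the iteration count since num strictly decreases; for num < 0 Python A
-- never returns, excluded by Pre_ below)
def decimal_to_26_loop (fuel : Nat) (num : Int) (res : String) : String :=
  match fuel with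
  | 0 => res
  | fuel + 1 =>
    if 0 < num then
      let mod := PySem.Int.mod num 26
      if mod = 0 then
        decimal_to_26_loop fuel (PySem.Int.floordiv num 26 - 1) ("Z" ++ res)
      else
        decimal_to_26_loop fuel (PySem.Int.floordiv num 26) (String.ofList [Char.ofNat (mod + 64).toNat] ++ res)
    else res

def decimal_to_26 (num : Int) : String := decimal_to_26_loop num.toNat num ""

-- ===== PORT B =====
-- B stage 1: while num > total: p *= 26; total += p; L += 1
-- (fuel only makes the loop total: total reaches num within num.toNat iterations)
def decimal_to_26_alt_stage1 (fuel : Nat) (num total p L : Int) : Int × Int × Int :=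
  match fuel with
  | 0 => (L, total, p)
  | fuel + 1 =>
    if num > total then
      decimal_to_26_alt_stage1 fuel num (total + p * 26) (p * 26) (L + 1)
    else (L, total, p)

-- B stage 2: for _ in range(L): p //= 26; res.append(chr(m // p + 65)); m %= p
def decimal_to_26_alt_stage2 (k : Nat) (p m : Int) (res : List Char) : List Char :=
  match k with
  | 0 => res
  | k + 1 =>
    let p' := PySem.Int.floordiv p 26
    decimal_to_26_alt_stage2 k p' (PySem.Int.mod m p')
      (res ++ [Char.ofNat (PySem.Int.floordiv m p' + 65).toNat])

def decimal_to_26_alt (num : Int) : String :=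
  let r := decimal_to_26_alt_stage1 num.toNat num 0 1 0
  let m := num - (r.2.1 - r.2.2) - 1
  String.ofList (decimal_to_26_alt_stage2 r.1.toNat r.2.2 m [])

-- ===== PRECONDITION & SPEC =====
-- Pre_ excludes negative num, on which Python A's 'while num:' loop never returns.
def Pre_decimal_to_26 (num : Int) : Prop := 0 ≤ num
instance (num : Int) : Decidable (Pre_decimal_to_26 num) := by unfold Pre_decimal_to_26; infer_instance
def pvWitness_decimal_to_26 : Int := (27)

def Spec_decimal_to_26 (num : Int) (out : String) : Prop := out = decimal_to_26_alt num
instance (num : Int) (out : String) : Decidable (Spec_decimal_to_26 num out) := by unfold Spec_decimal_to_26; infer_instance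

-- ===== CLAIM (what is proved, stated in full; the proofs are below) =====
def Claim_equal_decimal_to_26 : Prop := ∀ (num : Int), Dom_decimal_to_26 num → Pre_decimal_to_26 num → Spec_decimal_to_26 num (decimal_to_26 num)

-- ===== LEMMAS AND PROOFS =====

-- canonical digit list: f n = digits of n in bijective base 26 (empty for n ≤ 0)
def fList (n : Int) : List Char :=
  if 0 < n then
    fList (PySem.Int.floordiv (n - 1) 26) ++ [Char.ofNat ((PySem.Int.mod (n - 1) 26) + 65).toNat]
  else []
termination_by n.toNat
decreasing_by
  rw [PySem.Int.floordiv_eq_ediv_of_pos (by omega : (0:Int) < 26)]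
  omega

-- Sval L = 26 + 26^2 + ... + 26^L = number of strings of length ≤ L
def Sval : Nat → Int
  | 0 => 0
  | L + 1 => 26 * (Sval L + 1)

-- P k = Sval (k-1) + 1 (first number whose string has length k; P 0 = 0)
def Pval : Nat → Int
  | 0 => 0
  | k + 1 => 26 * Pval k + 1

-- padded k-digit base-26 representation, least significant digit appended last
def digitsLSB : Nat → Int → List Char
  | 0, _ => []
  | k + 1, m => digitsLSB k (m / 26) ++ [Char.ofNat (m % 26 + 65).toNat]

theorem Sval_nonneg (L : Nat) : 0 ≤ Sval L := by
  induction L with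
  | zero => simp [Sval]
  | succ L ih => simp [Sval]; omega

theorem Pval_eq (k : Nat) : Pval (k + 1) = Sval k + 1 := by
  induction k with
  | zero => simp [Pval, Sval]
  | succ k ih => simp [Pval, Sval] at *; omega

theorem pow_pos26 (k : Nat) : (0:Int) < 26 ^ k := pow_pos (by omega) k

-- A's loop equals fList with the accumulator appended (enough fuel given)
theorem loopA_eq (fuel : Nat) : ∀ (num : Int) (res : String), num.toNat ≤ fuel →
    decimal_to_26_loop fuel num res = String.ofList (fList num) ++ res := by
  induction fuel with
  | zero =>
    intro num res hf
    have h : ¬ 0 < num := by omega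
    rw [decimal_to_26_loop, fList, if_neg h]
    simp
  | succ fuel ih =>
    intro num res hf
    rw [decimal_to_26_loop, fList]
    by_cases h : 0 < num
    · rw [if_pos h, if_pos h]
      have h26 : (0:Int) < 26 := by omega
      simp only [PySem.Int.floordiv_eq_ediv_of_pos h26, PySem.Int.mod_eq_emod_of_pos h26]
      have hdm : 26 * (num / 26) + num % 26 = num := Int.mul_ediv_add_emod num 26
      have hmlt : num % 26 < 26 := Int.emod_lt_of_pos num h26
      have hm0 : 0 ≤ num % 26 := Int.emod_nonneg num (by omega)
      by_cases hz : num % 26 = 0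
      · rw [if_pos hz]
        have hq : (num - 1) / 26 = num / 26 - 1 := by
          have : num - 1 = 26 * (num / 26 - 1) + 25 := by omega
          rw [this]; omega
        have hr : (num - 1) % 26 = 25 := by
          have : num - 1 = 26 * (num / 26 - 1) + 25 := by omega
          rw [this]; omega
        rw [hq, hr, ih _ _ (by omega)]
        rw [String.ofList_append, String.append_assoc]
        rfl
      · rw [if_neg hz]
        have hq : (num - 1) / 26 = num / 26 := by
          have : num - 1 = 26 * (num / 26) + (num % 26 - 1) := by omega
          rw [this]; omega
        have hr : (num - 1) % 26 = num % 26 - 1 := by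
          have : num - 1 = 26 * (num / 26) + (num % 26 - 1) := by omega
          rw [this]; omega
        rw [hq, hr]
        have : num % 26 - 1 + 65 = num % 26 + 64 := by omega
        rw [this]
        rw [ih _ _ (by omega), String.ofList_append, String.append_assoc]
    · rw [if_neg h, if_neg h]; simp

-- fList on a k-digit block is the padded base-26 representation of the offset
theorem fList_block (k : Nat) : ∀ m : Int, 0 ≤ m → m < 26 ^ k →
    fList (m + Pval k) = digitsLSB k m := by
  induction k with
  | zero =>
    intro m h0 h1
    have : m = 0 := by simp at h1; omega
    subst this
    rw [fList]; simp [Pval, digitsLSB]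
  | succ k ih =>
    intro m h0 h1
    have hpos : 0 < m + Pval (k + 1) := by
      have := Pval_eq k; have := Sval_nonneg k; omega
    rw [fList, if_pos hpos]
    have h26 : (0:Int) < 26 := by omega
    simp only [PySem.Int.floordiv_eq_ediv_of_pos h26, PySem.Int.mod_eq_emod_of_pos h26]
    have he : m + Pval (k + 1) - 1 = m + 26 * Pval k := by simp [Pval]; ring
    rw [he]
    have hq : (m + 26 * Pval k) / 26 = m / 26 + Pval k := by
      rw [Int.add_mul_ediv_left _ _ (by omega : (26:Int) ≠ 0)]
    have hr : (m + 26 * Pval k) % 26 = m % 26 := by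
      simp [Int.add_mul_emod_self_left]
    rw [hq, hr, ih (m / 26) (Int.ediv_nonneg h0 (by omega)) (by
      have := pow_pos26 k
      rw [Int.ediv_lt_iff_lt_mul (by omega : (0:Int) < 26)]
      calc m < 26 ^ (k+1) := h1
        _ = 26 ^ k * 26 := by ring)]
    simp [digitsLSB]

-- MSB-first recursion for digitsLSB
theorem digitsLSB_msb (k : Nat) : ∀ m : Int, 0 ≤ m → m < 26 ^ (k + 1) →
    digitsLSB (k + 1) m =
      Char.ofNat (m / 26 ^ k + 65).toNat :: digitsLSB k (m % 26 ^ k) := by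
  induction k with
  | zero =>
    intro m h0 h1
    have hm : m < 26 := by simpa using h1
    simp [digitsLSB, Int.emod_eq_of_lt h0 hm]
  | succ k ih =>
    intro m h0 h1
    have h26 : (0:Int) < 26 := by omega
    have hpk : (0:Int) < 26 ^ k := pow_pos26 k
    have hpk1 : (0:Int) < 26 ^ (k + 1) := pow_pos26 (k + 1)
    have hdivlt : m / 26 < 26 ^ (k + 1) := by
      rw [Int.ediv_lt_iff_lt_mul h26]
      calc m < 26 ^ (k + 2) := h1
        _ = 26 ^ (k + 1) * 26 := by ring
    have hA : m / 26 / 26 ^ k = m / 26 ^ (k + 1) := by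
      rw [Int.ediv_ediv_of_nonneg (by omega : (0:Int) ≤ 26)]
      congr 1
      ring
    have hC : m % 26 ^ (k + 1) % 26 = m % 26 :=
      Int.emod_emod_of_dvd m ⟨26 ^ k, by ring⟩
    have hr0 : 0 ≤ m % 26 ^ (k + 1) := Int.emod_nonneg m (by omega)
    have hrlt : m % 26 ^ (k + 1) < 26 ^ (k + 1) := Int.emod_lt_of_pos m hpk1
    have hB : m / 26 % 26 ^ k = m % 26 ^ (k + 1) / 26 := by
      have hm : m = m % 26 ^ (k + 1) + 26 * (26 ^ k * (m / 26 ^ (k + 1))) := by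
        calc m = m % 26 ^ (k + 1) + 26 ^ (k + 1) * (m / 26 ^ (k + 1)) := by
              rw [Int.emod_add_mul_ediv]
          _ = _ := by ring
      have hdiv : m / 26 = m % 26 ^ (k + 1) / 26 + 26 ^ k * (m / 26 ^ (k + 1)) := by
        conv_lhs => rw [hm]
        rw [Int.add_mul_ediv_left _ _ (by omega : (26:Int) ≠ 0)]
      rw [hdiv, Int.add_mul_emod_self_left]
      exact Int.emod_eq_of_lt (Int.ediv_nonneg hr0 (by omega))
        (by rw [Int.ediv_lt_iff_lt_mul h26]; calc m % 26 ^ (k+1) < 26 ^ (k+1) := hrlt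
              _ ≤ 26 ^ k * 26 := by rw [← pow_succ])
    show digitsLSB (k + 1) (m / 26) ++ [Char.ofNat (m % 26 + 65).toNat] = _
    rw [ih (m / 26) (Int.ediv_nonneg h0 (by omega)) hdivlt]
    show _ = Char.ofNat (m / 26 ^ (k + 1) + 65).toNat ::
        (digitsLSB k (m % 26 ^ (k + 1) / 26) ++ [Char.ofNat (m % 26 ^ (k + 1) % 26 + 65).toNat])
    rw [hA, hB, hC]
    simp

-- stage2 computes digitsLSB, MSB-first, appended to the accumulator
theorem stage2_eq (k : Nat) : ∀ (m : Int) (acc : List Char), 0 ≤ m → m < 26 ^ k →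
    decimal_to_26_alt_stage2 k (26 ^ k) m acc = acc ++ digitsLSB k m := by
  induction k with
  | zero => intro m acc h0 h1; simp [decimal_to_26_alt_stage2, digitsLSB]
  | succ k ih =>
    intro m acc h0 h1
    rw [decimal_to_26_alt_stage2]
    have h26 : (0:Int) < 26 := by omega
    have hpk := pow_pos26 k
    have hp' : PySem.Int.floordiv (26 ^ (k+1)) 26 = 26 ^ k := by
      rw [PySem.Int.floordiv_eq_ediv_of_pos h26]
      rw [pow_succ]
      exact Int.mul_ediv_cancel _ (by omega)
    simp only [hp']
    rw [PySem.Int.floordiv_eq_ediv_of_pos hpk, PySem.Int.mod_eq_emod_of_pos hpk]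
    rw [ih (m % 26 ^ k) _ (Int.emod_nonneg m (by omega)) (Int.emod_lt_of_pos m hpk)]
    rw [digitsLSB_msb k m h0 h1]
    simp

theorem Sval_succ (j : Nat) : Sval (j + 1) = Sval j + 26 ^ (j + 1) := by
  induction j with
  | zero => simp [Sval]
  | succ j ih =>
    show Sval (j + 2) = Sval (j + 1) + 26 ^ (j + 2)
    calc Sval (j + 2) = 26 * (Sval (j + 1) + 1) := rfl
      _ = 26 * ((Sval j + 26 ^ (j + 1)) + 1) := by rw [ih]
      _ = 26 * (Sval j + 1) + 26 ^ (j + 2) := by ring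
      _ = Sval (j + 1) + 26 ^ (j + 2) := rfl

theorem Sval_ge (j : Nat) : (j : Int) ≤ Sval j := by
  induction j with
  | zero => simp [Sval]
  | succ j ih => show ((j:Int) + 1) ≤ 26 * (Sval j + 1); omega

theorem stage1_eq (fuel : Nat) : ∀ (num : Int) (j : Nat) (total p : Int)
    (_ht : total = Sval j) (_hq : p = 26 ^ j) (_hf : num ≤ Sval (j + fuel)),
    ∃ L : Nat, j ≤ L ∧
      decimal_to_26_alt_stage1 fuel num total p (j : Int) = ((L : Int), Sval L, 26 ^ L) ∧
      num ≤ Sval L ∧ (L = j ∨ Sval (L - 1) < num) := by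
  induction fuel with
  | zero =>
    intro num j total p ht hq hf
    rw [decimal_to_26_alt_stage1]
    exact ⟨j, le_refl _, by rw [ht, hq], by simpa using hf, Or.inl rfl⟩
  | succ fuel ih =>
    intro num j total p ht hq hf
    rw [decimal_to_26_alt_stage1]
    by_cases h : num > total
    · rw [if_pos h]
      obtain ⟨L, hjL, heq, hle, hor⟩ := ih num (j + 1) (total + p * 26) (p * 26)
        (by rw [ht, hq, Sval_succ]; ring) (by rw [hq]; ring)
        (by have : j + 1 + fuel = j + (fuel + 1) := by omega
            rw [this]; exact hf)
      push_cast at heq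
      refine ⟨L, by omega, heq, hle, Or.inr ?_⟩
      rcases hor with h' | h'
      · subst h'; simpa [ht] using h
      · exact h'
    · rw [if_neg h]
      exact ⟨j, le_refl _, by rw [ht, hq], by omega, Or.inl rfl⟩

-- ===== VERDICT (by name: the statement is the Claim_ definition above) =====
theorem decimal_to_26_spec : Claim_equal_decimal_to_26 := by
  intro num _ hpre
  unfold Pre_decimal_to_26 at hpre
  unfold Spec_decimal_to_26 decimal_to_26 decimal_to_26_alt
  rw [loopA_eq num.toNat num "" (le_refl _)]
  obtain ⟨L, _, heq, hle, hor⟩ :=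
    stage1_eq num.toNat num 0 0 1 rfl (by norm_num)
      (by have h1 := Sval_ge num.toNat; simp only [Nat.zero_add]; omega)
  norm_num at heq
  simp only [heq]
  match L, hor with
  | 0, _ =>
    have h0 : num = 0 := by
      have : Sval 0 = 0 := rfl
      omega
    subst h0
    rw [fList]
    simp [decimal_to_26_alt_stage2]
  | L + 1, hor =>
    have hlt : Sval L < num := by
      rcases hor with h' | h'
      · exact absurd h' (by omega)
      · simpa using h'
    have hSL : Sval (L + 1) = Sval L + 26 ^ (L + 1) := Sval_succ L
    have hP : Pval (L + 1) = Sval L + 1 := Pval_eq L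
    have hm0 : 0 ≤ num - (Sval (L + 1) - 26 ^ (L + 1)) - 1 := by omega
    have hm1 : num - (Sval (L + 1) - 26 ^ (L + 1)) - 1 < 26 ^ (L + 1) := by omega
    have htn : ((L + 1 : Nat) : Int).toNat = L + 1 := by omega
    simp only [htn]
    rw [stage2_eq (L + 1) _ _ hm0 hm1]
    have : num - (Sval (L + 1) - 26 ^ (L + 1)) - 1 + Pval (L + 1) = num := by omega
    rw [← fList_block (L + 1) _ hm0 hm1, this]
    simp
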